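-- pv_equiv track=rewrite | github.com/DanielSchaack/stt-utils | logic/Transcriptor.py | get_index_dupes
-- ===== SOURCE A (Python) =====
-- def get_index_dupes(dupes_list: list[int], index_list: list[int]) -> tuple[int, int]:
--     """Find the index of the minimum duplication count."""
--     min_dupes: int = min(dupes_list)
--     index: int = len(index_list) - 1
--
--     for current_dupe in reversed(dupes_list):
--         if current_dupe == min_dupes:
--             break
--         index -= 1
--
--     return index, min_dupes
-- ===== SOURCE B (Python) =====
-- def get_index_dupes(dupes_list: list[int], index_list: list[int]) -> tuple[int, int]:
--     """Find the index of the minimum duplication count."""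
--     if not dupes_list:
--         raise ValueError("min() arg is an empty sequence")
--     cur_min = dupes_list[0]
--     best = 0
--     for i, v in enumerate(dupes_list):
--         if v <= cur_min:
--             cur_min = v
--             best = i
--     return best + len(index_list) - len(dupes_list), cur_min
-- ===== Notes on version B (the rewrite author's own statement) =====
-- stated objective: alternative
-- what changed: B replaces A's two passes (min() plus a reverse break-scan) with one forward pass keeping a running minimum and the latest index achieving it, producing the same anchored index via best + len(index_list) - len(dupes_list).
import Mathlib
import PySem

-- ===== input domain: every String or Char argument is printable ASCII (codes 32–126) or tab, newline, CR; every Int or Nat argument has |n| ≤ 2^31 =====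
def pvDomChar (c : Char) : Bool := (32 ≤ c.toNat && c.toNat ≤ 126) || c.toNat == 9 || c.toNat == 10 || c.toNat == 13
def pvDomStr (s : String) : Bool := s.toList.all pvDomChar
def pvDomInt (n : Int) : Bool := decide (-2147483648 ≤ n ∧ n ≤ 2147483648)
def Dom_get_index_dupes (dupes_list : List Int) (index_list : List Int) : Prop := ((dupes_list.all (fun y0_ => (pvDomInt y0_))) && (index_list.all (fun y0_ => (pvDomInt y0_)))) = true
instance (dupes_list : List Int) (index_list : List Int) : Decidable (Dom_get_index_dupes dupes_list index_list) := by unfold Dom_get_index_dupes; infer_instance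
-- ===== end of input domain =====

-- B fuses A's min() pass and reverse break-scan into one forward pass with a running minimum and latest index (objective: alternative decomposition, same cost).

-- ===== PORT A =====
-- the `for current_dupe in reversed(dupes_list): if … break; index -= 1` loop
def pvLoopA (m : Int) : List Int → Int → Int
  | [], idx => idx
  | c :: rest, idx => if c == m then idx else pvLoopA m rest (idx - 1)

def get_index_dupes (dupes_list : List Int) (index_list : List Int) : Int × Int :=
  match PySem.List.min? dupes_list (fun x => x) with
  | none => (0, 0)  -- Python raises ValueError here; excluded by Pre_
  | some min_dupes =>
      (pvLoopA min_dupes dupes_list.reverse ((index_list.length : Int) - 1), min_dupes)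

-- ===== PORT B =====
-- body of `for i, v in enumerate(dupes_list): if v <= cur_min: …`
def pvStepB (p : Int × Int) (iv : Int × Int) : Int × Int :=
  if iv.2 ≤ p.1 then (iv.2, iv.1) else p

def get_index_dupes_alt (dupes_list : List Int) (index_list : List Int) : Int × Int :=
  match dupes_list with
  | [] => (0, 0)  -- B raises ValueError here; excluded by Pre_
  | h :: _ =>
      let st := (PySem.List.enumerate dupes_list 0).foldl pvStepB (h, 0)
      (st.2 + (index_list.length : Int) - (dupes_list.length : Int), st.1)

-- ===== PRECONDITION & SPEC =====
-- Pre_ excludes the empty dupes_list, on which Python A raises ValueError (min of empty sequence).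
def Pre_get_index_dupes (dupes_list : List Int) (index_list : List Int) : Prop := dupes_list ≠ []
instance (dupes_list : List Int) (index_list : List Int) : Decidable (Pre_get_index_dupes dupes_list index_list) := by unfold Pre_get_index_dupes; infer_instance

def pvWitness_get_index_dupes : List Int × List Int := ([2, 1, 1, 3], [0, 1, 2, 3])

def Spec_get_index_dupes (dupes_list : List Int) (index_list : List Int) (out : Int × Int) : Prop := out = get_index_dupes_alt dupes_list index_list
instance (dupes_list : List Int) (index_list : List Int) (out : Int × Int) : Decidable (Spec_get_index_dupes dupes_list index_list out) := by unfold Spec_get_index_dupes; infer_instance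

-- ===== CLAIM (what is proved, stated in full; the proofs are below) =====
def Claim_equal_get_index_dupes : Prop := ∀ (dupes_list : List Int) (index_list : List Int), Dom_get_index_dupes dupes_list index_list → Pre_get_index_dupes dupes_list index_list → Spec_get_index_dupes dupes_list index_list (get_index_dupes dupes_list index_list)

-- ===== LEMMAS AND PROOFS =====

-- reference function: (minimum value, rightmost index of the minimum)
def fmin : List Int → Int × Int
  | [] => (0, 0)
  | [a] => (a, 0)
  | a :: b :: t =>
      let p := fmin (b :: t)
      if p.1 ≤ a then (p.1, p.2 + 1) else (a, 0)

theorem foldl_min_init (t : List Int) : ∀ x y : Int, t.foldl min (min x y) = min x (t.foldl min y) := by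
  induction t with
  | nil => intro x y; simp
  | cons c t ih =>
      intro x y
      simp only [List.foldl_cons]
      rw [min_assoc, ih]

theorem fmin_fst (a : Int) (t : List Int) : (fmin (a :: t)).1 = t.foldl min a := by
  induction t generalizing a with
  | nil => simp [fmin]
  | cons b t ih =>
      simp only [fmin, List.foldl_cons]
      have hinit := foldl_min_init t a b
      by_cases h : (fmin (b :: t)).1 ≤ a
      · simp only [if_pos h]
        rw [ih] at h ⊢
        omega
      · simp only [if_neg h]
        rw [ih] at h
        omega

theorem fmin_min (l : List Int) (hl : l ≠ []) : ∀ x ∈ l, (fmin l).1 ≤ x := by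
  induction l with
  | nil => simp
  | cons a t ih =>
      cases t with
      | nil => intro x hx; simp only [List.mem_singleton] at hx; simp [fmin, hx]
      | cons b t' =>
          intro x hx
          have ih' := ih (by simp)
          simp only [fmin]
          by_cases h : (fmin (b :: t')).1 ≤ a
          · simp only [if_pos h]
            rcases List.mem_cons.mp hx with rfl | hx'
            · exact h
            · exact ih' x hx'
          · simp only [if_neg h]
            rcases List.mem_cons.mp hx with rfl | hx'
            · exact le_refl x
            · have := ih' x hx'; omega

theorem fmin_mem (l : List Int) (hl : l ≠ []) : (fmin l).1 ∈ l := by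
  induction l with
  | nil => simp at hl
  | cons a t ih =>
      cases t with
      | nil => simp [fmin]
      | cons b t' =>
          have ih' := ih (by simp)
          simp only [fmin]
          by_cases h : (fmin (b :: t')).1 ≤ a
          · simp only [if_pos h]
            exact List.mem_cons_of_mem a ih'
          · simp only [if_neg h]
            exact List.mem_cons_self

theorem fmin_idx (l : List Int) (hl : l ≠ []) : 0 ≤ (fmin l).2 ∧ (fmin l).2 ≤ (l.length : Int) - 1 := by
  induction l with
  | nil => simp at hl
  | cons a t ih =>
      cases t with
      | nil => simp [fmin]
      | cons b t' =>
          have ih' := ih (by simp)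
          simp only [fmin]
          by_cases h : (fmin (b :: t')).1 ≤ a
          · simp only [if_pos h]
            simp only [List.length_cons] at ih' ⊢
            push_cast at ih' ⊢
            omega
          · simp only [if_neg h]
            simp only [List.length_cons]
            exact ⟨le_refl 0, by omega⟩

theorem min?_eq_fmin (l : List Int) (hl : l ≠ []) :
    PySem.List.min? l (fun x => x) = some (fmin l).1 := by
  cases l with
  | nil => simp at hl
  | cons a t =>
      rw [PySem.List.min?_id_cons, fmin_fst]

theorem loopA_append (m : Int) (xs ys : List Int) (k : Int) :
    pvLoopA m (xs ++ ys) k =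
      if xs.any (fun c => c == m) then pvLoopA m xs k else pvLoopA m ys (k - xs.length) := by
  induction xs generalizing k with
  | nil => simp
  | cons c xs ih =>
      simp only [List.cons_append, pvLoopA, List.any_cons]
      by_cases hc : c == m
      · simp [hc]
      · simp only [hc, Bool.false_or, if_neg, Bool.not_eq_true]
        rw [ih]
        by_cases hx : xs.any (fun c => c == m)
        · simp [hx]
        · simp only [hx, if_neg, Bool.not_eq_true, List.length_cons]
          have h1 : (k - 1 - (xs.length : Int)) = k - ((xs.length : Int) + 1) := by omega
          push_cast
          rw [h1]

theorem loopA_reverse (l : List Int) (hl : l ≠ []) (k : Int) :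
    pvLoopA (fmin l).1 l.reverse k = k - ((l.length : Int) - 1 - (fmin l).2) := by
  induction l generalizing k with
  | nil => simp at hl
  | cons a t ih =>
      cases t with
      | nil => simp [fmin, pvLoopA]
      | cons b t' =>
          have ih' := ih (by simp)
          have hmem := fmin_mem (b :: t') (by simp)
          have hmin := fmin_min (b :: t') (by simp)
          simp only [fmin]
          rw [List.reverse_cons]
          by_cases h : (fmin (b :: t')).1 ≤ a
          · simp only [if_pos h]
            rw [loopA_append]
            have hany : (b :: t').reverse.any (fun c => c == (fmin (b :: t')).1) = true := by
              rw [List.any_eq_true]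
              exact ⟨(fmin (b :: t')).1, by rw [List.mem_reverse]; exact hmem, by simp⟩
            rw [if_pos hany, ih']
            simp only [List.length_cons]
            push_cast
            omega
          · simp only [if_neg h]
            rw [loopA_append]
            have hany : (b :: t').reverse.any (fun c => c == a) = false := by
              rw [Bool.eq_false_iff, Ne, List.any_eq_true]
              rintro ⟨x, hx, hbe⟩
              rw [List.mem_reverse] at hx
              have h1 := hmin x hx
              have h2 : x = a := by simpa using hbe
              omega
            rw [if_neg (by simp only [hany]; exact Bool.false_ne_true), List.length_reverse]
            simp only [pvLoopA, BEq.rfl, if_pos, List.length_cons]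
            push_cast
            omega

theorem foldB_char (l : List Int) (hl : l ≠ []) (k : Int) (m0 b0 : Int) :
    (PySem.List.enumerate l k).foldl pvStepB (m0, b0) =
      (if (fmin l).1 ≤ m0 then (fmin l).1 else m0,
       if (fmin l).1 ≤ m0 then k + (fmin l).2 else b0) := by
  induction l generalizing k m0 b0 with
  | nil => simp at hl
  | cons a t ih =>
      rw [PySem.List.enumerate_cons, List.foldl_cons]
      have hstep : pvStepB (m0, b0) (k, a) = if a ≤ m0 then (a, k) else (m0, b0) := rfl
      cases t with
      | nil =>
          rw [PySem.List.enumerate_nil, List.foldl_nil, hstep]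
          simp only [fmin]
          by_cases h : a ≤ m0
          · simp only [if_pos h]
            rw [Prod.mk.injEq]
            refine ⟨?_, ?_⟩ <;> omega
          · simp only [if_neg h]
      | cons b t' =>
          have ih' := ih (by simp)
          rw [hstep]
          by_cases h : a ≤ m0
          · rw [if_pos h, ih' (k + 1) a k]
            simp only [fmin]
            by_cases h2 : (fmin (b :: t')).1 ≤ a
            · simp only [if_pos h2]
              rw [Prod.mk.injEq]
              refine ⟨?_, ?_⟩ <;> (try split_ifs) <;> omega
            · simp only [if_neg h2]
              rw [Prod.mk.injEq]
              refine ⟨?_, ?_⟩ <;> (try split_ifs) <;> omega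
          · rw [if_neg h, ih' (k + 1) m0 b0]
            simp only [fmin]
            by_cases h2 : (fmin (b :: t')).1 ≤ a
            · simp only [if_pos h2]
              rw [Prod.mk.injEq]
              refine ⟨?_, ?_⟩ <;> (try split_ifs) <;> omega
            · simp only [if_neg h2]
              rw [Prod.mk.injEq]
              refine ⟨?_, ?_⟩ <;> (try split_ifs) <;> omega

-- ===== VERDICT (by name: the statement is the Claim_ definition above) =====
theorem get_index_dupes_spec : Claim_equal_get_index_dupes := by
  intro d il _ hpre
  unfold Spec_get_index_dupes
  unfold Pre_get_index_dupes at hpre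
  cases hd : d with
  | nil => exact absurd hd hpre
  | cons h t =>
      subst hd
      have hne : (h :: t : List Int) ≠ [] := by simp
      unfold get_index_dupes get_index_dupes_alt
      rw [min?_eq_fmin _ hne]
      simp only
      rw [loopA_reverse _ hne, foldB_char _ hne 0 h 0]
      have hmin := fmin_min (h :: t) hne h List.mem_cons_self
      have hidx := fmin_idx (h :: t) hne
      simp only [if_pos hmin]
      rw [Prod.mk.injEq]
      refine ⟨by omega, by omega⟩
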